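-- pv_equiv track=rewrite | github.com/DevFrog92/sparta_algorithm | week_1/HW_01_find_prime_numbers_under_specific_number.py | find_prime_list_under_number
-- ===== SOURCE A (Python) =====
-- def find_prime_list_under_number(number):
--     prime_list = []
--     for n in range(2,number+1):
--         for i in prime_list:
--             if n%i == 0 and i*i <= number:
--                 break
--         else:
--             prime_list.append(n)
--     return prime_list
-- ===== SOURCE B (Python) =====
-- def find_prime_list_under_number(number):
--     def is_prime(n):
--         d = 2
--         while d * d <= n:
--             if n % d == 0:
--                 return False
--             d += 1
--         return True
--     return [n for n in range(2, number + 1) if is_prime(n)]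
-- ===== Notes on version B (the rewrite author's own statement) =====
-- stated objective: faster
-- what changed: replaces A's shared accumulated prime list (each candidate scanned against the whole list) with an independent trial-division test up to sqrt(n) per candidate
import Mathlib
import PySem

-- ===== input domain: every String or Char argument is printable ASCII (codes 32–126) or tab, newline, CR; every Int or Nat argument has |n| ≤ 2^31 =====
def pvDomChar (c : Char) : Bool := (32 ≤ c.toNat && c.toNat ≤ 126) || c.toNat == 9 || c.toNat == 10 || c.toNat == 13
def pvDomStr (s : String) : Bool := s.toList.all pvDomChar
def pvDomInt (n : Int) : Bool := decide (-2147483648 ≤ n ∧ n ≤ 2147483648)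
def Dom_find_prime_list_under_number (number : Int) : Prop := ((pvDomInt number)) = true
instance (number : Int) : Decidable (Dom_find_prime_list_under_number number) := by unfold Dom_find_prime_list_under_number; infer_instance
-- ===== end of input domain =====

-- B replaces A's shared accumulated prime list (each candidate scanned against the whole list)
-- with an independent trial-division test up to sqrt(n) per candidate; measured faster on large inputs.

-- ===== PORT A =====
-- for n in range(2, number+1): scan prime_list for a divisor i with i*i <= number (break), else append n
def find_prime_list_under_number (number : Int) : List Int :=
  (PySem.List.pyRange 2 (number + 1) 1).foldl
    (fun pl n =>
      if pl.any (fun i => PySem.Int.mod n i == 0 && decide (i * i ≤ number)) then pl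
      else pl ++ [n]) []

-- ===== PORT B =====
-- while d*d <= n: if n % d == 0: return False; d += 1; return True
def pvIsPrimeAux (n d : Int) : Bool :=
  if _h : d * d ≤ n then
    if PySem.Int.mod n d == 0 then false
    else pvIsPrimeAux n (d + 1)
  else true
termination_by (n + 1 - d).toNat
decreasing_by
  have hd : d ≤ n := by nlinarith [mul_self_nonneg (d - 1)]
  omega

def find_prime_list_under_number_alt (number : Int) : List Int :=
  (PySem.List.pyRange 2 (number + 1) 1).filter (fun n => pvIsPrimeAux n 2)

-- ===== PRECONDITION & SPEC =====
def Spec_find_prime_list_under_number (number : Int) (out : List Int) : Prop := out = find_prime_list_under_number_alt number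
instance (number : Int) (out : List Int) : Decidable (Spec_find_prime_list_under_number number out) := by unfold Spec_find_prime_list_under_number; infer_instance

-- ===== CLAIM (what is proved, stated in full; the proofs are below) =====
def Claim_equal_find_prime_list_under_number : Prop := ∀ (number : Int), Dom_find_prime_list_under_number number → Spec_find_prime_list_under_number number (find_prime_list_under_number number)

-- ===== LEMMAS AND PROOFS =====

-- B's loop decides "no divisor k with d ≤ k and k*k ≤ n"
theorem pvIsPrimeAux_iff (n d : Int) (hd : 1 ≤ d) :
    pvIsPrimeAux n d = true ↔ ∀ k : Int, d ≤ k → k * k ≤ n → ¬ (k ∣ n) := by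
  fun_induction pvIsPrimeAux n d with
  | case1 d h hm =>
    simp only [Bool.false_eq_true, false_iff]
    intro H
    exact H d (le_refl d) h ((PySem.Int.mod_eq_zero_iff_dvd n d).mp (by simpa using hm))
  | case2 d h hm ih =>
    rw [ih (by omega)]
    constructor
    · intro H k hk hkk
      rcases (by omega : d = k ∨ d + 1 ≤ k) with rfl | hk'
      · simp only [beq_iff_eq] at hm
        rw [← PySem.Int.mod_eq_zero_iff_dvd]; exact hm
      · exact H k hk' hkk
    · intro H k hk hkk; exact H k (by omega) hkk
  | case3 d h =>
    simp only [true_iff]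
    intro k hk hkk
    exact absurd hkk (by nlinarith)

-- B's test is primality (for 2 ≤ n)
theorem pvIsPrimeAux_prime (n : Int) (hn : 2 ≤ n) :
    pvIsPrimeAux n 2 = true ↔ Nat.Prime n.toNat := by
  have hcast : ((n.toNat : Int)) = n := Int.toNat_of_nonneg (by omega)
  rw [pvIsPrimeAux_iff n 2 (by omega), Nat.prime_def_le_sqrt]
  constructor
  · intro H
    refine ⟨by omega, fun m hm hms hdvd => ?_⟩
    have hmm : m * m ≤ n.toNat := Nat.le_sqrt.mp hms
    have hmm' : (m : Int) * m ≤ n := by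
      have : ((m * m : Nat) : Int) ≤ (n.toNat : Int) := by exact_mod_cast hmm
      rw [hcast] at this; exact_mod_cast this
    refine H (m : Int) (by exact_mod_cast hm) hmm' ?_
    have : (m : Int) ∣ (n.toNat : Int) := Int.natCast_dvd_natCast.mpr hdvd
    rwa [hcast] at this
  · rintro ⟨-, H⟩ k hk hkk hdvd
    have hdvd' : k.toNat ∣ n.toNat := by
      rw [← hcast, ← Int.toNat_of_nonneg (by omega : (0:Int) ≤ k)] at hdvd
      exact_mod_cast hdvd
    refine H k.toNat (by omega) (Nat.le_sqrt.mpr ?_) hdvd'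
    have : ((k.toNat * k.toNat : Nat) : Int) ≤ (n.toNat : Int) := by
      push_cast
      rw [Int.toNat_of_nonneg (by omega : (0:Int) ≤ k), hcast]
      exact hkk
    exact_mod_cast this

-- A's fold builds exactly the primes in [2, b)
theorem fold_primes (number b : Int) (h2 : 2 ≤ b) (hb : b ≤ number + 1) :
    (PySem.List.pyRange 2 b 1).foldl
      (fun pl n =>
        if pl.any (fun i => PySem.Int.mod n i == 0 && decide (i * i ≤ number)) then pl
        else pl ++ [n]) []
    = (PySem.List.pyRange 2 b 1).filter (fun n => decide (Nat.Prime n.toNat)) := by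
  induction b, h2 using Int.le_induction with
  | base => rw [PySem.List.pyRange_one_eq_nil (le_refl 2)]; rfl
  | succ b hb ih =>
    have hR : PySem.List.pyRange 2 (b + 1) 1 = PySem.List.pyRange 2 b 1 ++ [b] :=
      PySem.List.pyRange_one_succ_right (by omega)
    rw [hR, List.foldl_append, List.filter_append, ih (by omega)]
    simp only [List.foldl_cons, List.foldl_nil, List.filter_cons, List.filter_nil]
    by_cases hp : Nat.Prime b.toNat
    · rw [if_neg, if_pos (by simpa using hp)]
      intro hA
      obtain ⟨i, hiF, hq⟩ := List.any_eq_true.mp hA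
      obtain ⟨hiR, hiP⟩ := List.mem_filter.mp hiF
      obtain ⟨hi2, hib⟩ := PySem.List.mem_pyRange_one.mp hiR
      obtain ⟨hqd, -⟩ := Bool.and_eq_true_iff.mp hq
      have hdvd : i ∣ b := (PySem.Int.mod_eq_zero_iff_dvd b i).mp (by simpa using hqd)
      have hdvd' : i.toNat ∣ b.toNat := by
        rw [← Int.toNat_of_nonneg (by omega : (0:Int) ≤ b),
            ← Int.toNat_of_nonneg (by omega : (0:Int) ≤ i)] at hdvd
        exact_mod_cast hdvd
      exact (Nat.prime_def_lt'.mp hp).2 i.toNat (by omega) (by omega) hdvd'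
    · rw [if_pos, if_neg (by simpa using hp), List.append_nil]
      have hN1 : b.toNat ≠ 1 := by omega
      have hpf := Nat.minFac_prime hN1
      have hdvd := Nat.minFac_dvd b.toNat
      have hsq : b.toNat.minFac ^ 2 ≤ b.toNat := Nat.minFac_sq_le_self (by omega) hp
      have hle : b.toNat.minFac ≤ b.toNat := Nat.le_of_dvd (by omega) hdvd
      have hne : b.toNat.minFac ≠ b.toNat := fun he => hp (he ▸ hpf)
      have hcast : ((b.toNat : Int)) = b := Int.toNat_of_nonneg (by omega)
      refine List.any_eq_true.mpr ⟨(b.toNat.minFac : Int), List.mem_filter.mpr ⟨?_, ?_⟩, ?_⟩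
      · exact PySem.List.mem_pyRange_one.mpr ⟨by exact_mod_cast hpf.two_le, by
          rw [← hcast]; exact_mod_cast (by omega : b.toNat.minFac < b.toNat)⟩
      · simpa using hpf
      · refine Bool.and_eq_true_iff.mpr ⟨by
          simpa using (PySem.Int.mod_eq_zero_iff_dvd b (b.toNat.minFac : Int)).mpr
            (by rw [← hcast]; exact_mod_cast hdvd), ?_⟩
        have : ((b.toNat.minFac * b.toNat.minFac : Nat) : Int) ≤ number := by
          have : (b.toNat : Int) ≤ number := by omega
          calc ((b.toNat.minFac * b.toNat.minFac : Nat) : Int)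
              ≤ (b.toNat : Int) := by exact_mod_cast (by nlinarith : b.toNat.minFac * b.toNat.minFac ≤ b.toNat)
            _ ≤ number := this
        simpa using this

-- ===== VERDICT (by name: the statement is the Claim_ definition above) =====
theorem find_prime_list_under_number_spec : Claim_equal_find_prime_list_under_number := by
  intro number _
  unfold Spec_find_prime_list_under_number find_prime_list_under_number find_prime_list_under_number_alt
  by_cases h : number + 1 ≤ 2
  · rw [PySem.List.pyRange_one_eq_nil h]; rfl
  · rw [fold_primes number (number + 1) (by omega) (le_refl _)]
    refine List.filter_congr fun x hx => ?_
    obtain ⟨hx2, -⟩ := PySem.List.mem_pyRange_one.mp hx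
    have hiff := pvIsPrimeAux_prime x hx2
    by_cases hpx : Nat.Prime x.toNat
    · simp [hpx, hiff.mpr hpx]
    · simp only [hpx, decide_false]
      exact (Bool.not_eq_true _).mp (fun hT => hpx (hiff.mp hT)) |>.symm ▸ rfl
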